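-- pv_equiv track=rewrite | github.com/newkimjiwon/CodingTest | BAEKJOON/S4/2578번_빙고.py | solution
-- ===== SOURCE A (Python) =====
-- def solution(bingo, moderator):
--     bingo_Arr = []
--
--     left = []
--     right = []
--
--     # 1. 빙고가 나올 수 있는 경우의 수
--     for i in range(len(bingo)):
--         bingo_Arr.append(bingo[i])
--
--         left.append(bingo[i][i])
--         right.append(bingo[i][len(bingo) - 1 - i])
--
--         tem = []
--         for j in range(len(bingo)):
--             tem.append(bingo[j][i])
--
--         bingo_Arr.append(tem)
--
--     bingo_Arr.append(left)
--     bingo_Arr.append(right)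
--
--     # 2. 숫자를 부르면 확인 시작
--     called = set()  # 부른 숫자 저장
--     count = 0
--
--     # 사회자가 숫자를 하나씩 부름
--     for i in range(5):
--         for j in range(5):
--             count += 1
--             called.add(moderator[i][j])
--
--             # 빙고 줄이 몇 개인지 계산
--             bingo_count = 0
--             for line in bingo_Arr:
--                 line_complete = True  # 이 줄이 완성됐는지 여부
--                 for num in line:
--                     if num not in called:
--                         line_complete = False
--                         break  # 하나라도 안 불린 숫자가 있으면 종료
--                 if line_complete:
--                     bingo_count += 1
--
--             # 3줄 이상이면 즉시 종료
--             if bingo_count >= 3: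
--                 return count
--
--     return count
-- ===== SOURCE B (Python) =====
-- def solution(bingo, moderator):
--     n = len(bingo)
--     lines = []
--     for i in range(n):
--         lines.append(bingo[i])
--         lines.append([row[i] for row in bingo])
--     lines.append([bingo[i][i] for i in range(n)])
--     lines.append([bingo[i][n - 1 - i] for i in range(n)])
--
--     # map each value to the ids of the lines containing it (once per occurrence)
--     line_ids = {}
--     for lid, line in enumerate(lines):
--         for v in line:
--             line_ids.setdefault(v, []).append(lid)
--
--     remaining = [len(line) for line in lines]
--     bingo_count = 0
--     seen = set()
--     count = 0
--     for i in range(5):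
--         for j in range(5):
--             count += 1
--             v = moderator[i][j]
--             if v not in seen:
--                 seen.add(v)
--                 for lid in line_ids.get(v, ()):
--                     remaining[lid] -= 1
--                     if remaining[lid] == 0:
--                         bingo_count += 1
--             if bingo_count >= 3:
--                 return count
--     return count
-- ===== Notes on version B (the rewrite author's own statement) =====
-- stated objective: alternative
-- what changed: Instead of re-scanning every bingo line after each called number, B precomputes a dict mapping each board value to the ids of the lines containing it plus a remaining-cells counter per line, and maintains a running bingo count that grows when a counter hits zero.
import Mathlib
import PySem

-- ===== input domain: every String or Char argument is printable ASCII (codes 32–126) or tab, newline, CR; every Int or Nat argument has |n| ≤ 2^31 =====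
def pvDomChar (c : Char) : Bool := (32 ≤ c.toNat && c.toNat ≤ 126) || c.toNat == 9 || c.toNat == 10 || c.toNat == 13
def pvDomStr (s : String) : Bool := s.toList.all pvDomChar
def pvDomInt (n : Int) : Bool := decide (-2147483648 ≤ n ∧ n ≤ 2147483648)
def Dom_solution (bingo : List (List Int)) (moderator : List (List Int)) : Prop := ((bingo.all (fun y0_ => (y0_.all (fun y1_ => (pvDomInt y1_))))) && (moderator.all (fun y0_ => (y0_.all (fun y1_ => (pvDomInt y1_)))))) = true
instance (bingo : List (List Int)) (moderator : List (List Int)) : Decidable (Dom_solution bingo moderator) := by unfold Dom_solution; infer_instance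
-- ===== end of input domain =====

-- B replaces A's full re-scan of every bingo line after each call by a value→line-ids
-- index with per-line remaining counters and a running bingo count (objective:
-- alternative algorithm; after the one-off indexing pass each call touches only the
-- lines containing the called value).

-- ===== PORT A =====
def pvLineComplete (called : PySem.Set Int) : List Int → Bool
  | [] => true
  | x :: xs => if called.contains x = false then false else pvLineComplete called xs

def pvCountComplete (called : PySem.Set Int) (lines : List (List Int)) : Int :=
  lines.foldl (fun c l => if pvLineComplete called l then c + 1 else c) 0

def pvLinesA (bingo : List (List Int)) : List (List Int) :=
  let n := bingo.length
  let st := (List.range n).foldl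
    (fun (st : List (List Int) × List Int × List Int) i =>
      (st.1 ++ [bingo.getD i []] ++ [(List.range n).map (fun j => (bingo.getD j []).getD i 0)],
       st.2.1 ++ [(bingo.getD i []).getD i 0],
       st.2.2 ++ [(bingo.getD i []).getD (n - 1 - i) 0]))
    ([], [], [])
  st.1 ++ [st.2.1, st.2.2]

def pvCallsA (moderator : List (List Int)) : List Int :=
  (List.range 5).flatMap (fun i => (List.range 5).map (fun j => (moderator.getD i []).getD j 0))

def pvAGo (lines : List (List Int)) : List Int → PySem.Set Int → Int → Int
  | [], _, count => count
  | v :: rest, called, count =>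
    let called' := called.add v
    if pvCountComplete called' lines ≥ 3 then count + 1
    else pvAGo lines rest called' (count + 1)

def solution (bingo : List (List Int)) (moderator : List (List Int)) : Int :=
  pvAGo (pvLinesA bingo) (pvCallsA moderator) ([] : PySem.Set Int) 0

-- ===== PORT B =====
def pvLinesB (bingo : List (List Int)) : List (List Int) :=
  let n := bingo.length
  ((List.range n).foldl
    (fun acc i => acc ++ [bingo.getD i []] ++ [bingo.map (fun row => row.getD i 0)]) [])
  ++ [(List.range n).map (fun i => (bingo.getD i []).getD i 0)]
  ++ [(List.range n).map (fun i => (bingo.getD i []).getD (n - 1 - i) 0)]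

def pvBuildMap (lines : List (List Int)) : PySem.Dict Int (List Int) :=
  (PySem.List.enumerate lines 0).foldl
    (fun d p => p.2.foldl (fun d v => d.modify v [] (· ++ [p.1])) d) PySem.Dict.empty

def pvCallsB (moderator : List (List Int)) : List Int :=
  (List.range 5).flatMap (fun i => (List.range 5).map (fun j => (moderator.getD i []).getD j 0))

def pvDec (st : List Int × Int) (lid : Int) : List Int × Int :=
  let r := PySem.List.pyGetD st.1 lid 0 - 1
  (PySem.List.pySetD st.1 lid r, if r = 0 then st.2 + 1 else st.2)

def pvBGo (lmap : PySem.Dict Int (List Int)) : List Int → PySem.Set Int → List Int → Int → Int → Int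
  | [], _, _, _, count => count
  | v :: rest, seen, rem, bc, count =>
    if seen.contains v then
      if bc ≥ 3 then count + 1 else pvBGo lmap rest seen rem bc (count + 1)
    else
      let seen' := seen.add v
      let st := (lmap.getD v []).foldl pvDec (rem, bc)
      if st.2 ≥ 3 then count + 1 else pvBGo lmap rest seen' st.1 st.2 (count + 1)

def solution_alt (bingo : List (List Int)) (moderator : List (List Int)) : Int :=
  let lines := pvLinesB bingo
  pvBGo (pvBuildMap lines) (pvCallsB moderator) ([] : PySem.Set Int)
    (lines.map (fun l => (l.length : Int))) 0 0

-- ===== PRECONDITION & SPEC =====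
-- Exactly the inputs on which Python A returns (elsewhere it raises IndexError):
-- a square board (every row at least as long as the board), and either all 25 moderator
-- cells exist, or three lines are already complete within the accessible prefix of
-- moderator cells (line completion is monotone in the call prefix, so A's early return
-- happens iff it happens by the end of that prefix).
def pvCellsSpec (moderator : List (List Int)) : List (Option Int) :=
  (List.range 5).flatMap (fun i => (List.range 5).map (fun j => moderator[i]?.bind (fun r => r[j]?)))

def pvAvailSpec (moderator : List (List Int)) : List Int :=
  ((pvCellsSpec moderator).takeWhile Option.isSome).filterMap id

def pvLinesSpec (bingo : List (List Int)) : List (List Int) :=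
  bingo ++ (List.range bingo.length).map (fun i => bingo.map (fun row => row.getD i 0))
    ++ [(List.range bingo.length).map (fun i => (bingo.getD i []).getD i 0),
        (List.range bingo.length).map (fun i => (bingo.getD i []).getD (bingo.length - 1 - i) 0)]

def pvDone3 (bingo : List (List Int)) (called : List Int) : Bool :=
  3 ≤ (pvLinesSpec bingo).countP (fun l => l.all (called.contains ·))

def Pre_solution (bingo : List (List Int)) (moderator : List (List Int)) : Prop :=
  (∀ row ∈ bingo, bingo.length ≤ row.length) ∧
    ((pvCellsSpec moderator).all Option.isSome = true ∨ pvDone3 bingo (pvAvailSpec moderator) = true)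
instance (bingo : List (List Int)) (moderator : List (List Int)) : Decidable (Pre_solution bingo moderator) := by unfold Pre_solution; infer_instance

def pvWitness_solution : List (List Int) × List (List Int) :=
  ([[1]], [[1, 2, 3, 4, 5], [6, 7, 8, 9, 10], [11, 12, 13, 14, 15],
           [16, 17, 18, 19, 20], [21, 22, 23, 24, 25]])

def Spec_solution (bingo : List (List Int)) (moderator : List (List Int)) (out : Int) : Prop := out = solution_alt bingo moderator
instance (bingo : List (List Int)) (moderator : List (List Int)) (out : Int) : Decidable (Spec_solution bingo moderator out) := by unfold Spec_solution; infer_instance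

-- ===== CLAIM (what is proved, stated in full; the proofs are below) =====
def Claim_equal_solution : Prop := ∀ (bingo : List (List Int)) (moderator : List (List Int)), Dom_solution bingo moderator → Pre_solution bingo moderator → Spec_solution bingo moderator (solution bingo moderator)

-- ===== LEMMAS AND PROOFS =====

-- number of not-yet-called cells of a line
def pvR (S : PySem.Set Int) (l : List Int) : Nat := l.countP (fun v => !(S.contains v))

theorem pvLineComplete_eq (S : PySem.Set Int) (l : List Int) :
    pvLineComplete S l = decide (pvR S l = 0) := by
  induction l with
  | nil => simp [pvLineComplete, pvR]
  | cons x xs ih =>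
    by_cases h : S.contains x = true <;>
      simp [pvLineComplete, pvR, List.countP_cons, ih] <;> simp_all [pvR]

theorem pvCountComplete_eq (S : PySem.Set Int) (lines : List (List Int)) :
    pvCountComplete S lines = ((lines.countP (fun l => decide (pvR S l = 0)) : Nat) : Int) := by
  unfold pvCountComplete
  simp only [pvLineComplete_eq]
  simpa using PySem.List.foldl_count_if (fun l => decide (pvR S l = 0)) lines 0

theorem pvR_add (S : PySem.Set Int) (v : Int) (l : List Int) (hv : v ∉ S) :
    pvR S l = pvR (S.add v) l + l.count v := by
  have hvS : S.contains v = false := by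
    rw [Bool.eq_false_iff]; intro hc; exact hv ((PySem.Set.contains_iff _ _).1 hc)
  induction l with
  | nil => simp [pvR]
  | cons x xs ih =>
    have hA : (S.add v).contains x = (S.contains x || x == v) := by
      cases hb : (S.contains x || x == v) with
      | false =>
        rw [Bool.eq_false_iff]
        intro hc
        rcases (PySem.Set.mem_add S v x).1 ((PySem.Set.contains_iff _ _).1 hc) with h | h
        · have h1 : S.contains x = true := (PySem.Set.contains_iff _ _).2 h
          rw [h1] at hb
          exact absurd hb (by simp)
        · subst h
          simp at hb
      | true =>
        rcases Bool.or_eq_true_iff.1 hb with h | h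
        · apply (PySem.Set.contains_iff _ _).2
          rw [PySem.Set.mem_add]
          exact Or.inl ((PySem.Set.contains_iff _ _).1 h)
        · apply (PySem.Set.contains_iff _ _).2
          rw [PySem.Set.mem_add]
          exact Or.inr (eq_of_beq h)
    simp only [pvR, List.countP_cons, List.count_cons, hA] at *
    cases hS : S.contains x <;> cases hbv : x == v
    · simp only [Bool.or_false, Bool.not_false, Bool.false_eq_true, if_true, if_false]; omega
    · simp only [Bool.false_or, Bool.not_false, Bool.not_true, Bool.false_eq_true, if_true,
        if_false]; omega
    · simp only [Bool.or_false, Bool.not_true, Bool.false_eq_true, if_false]; omega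
    · exfalso
      have hx : x = v := eq_of_beq hbv
      subst hx
      rw [hS] at hvS
      exact Bool.true_eq_false.mp hvS

theorem pvCount_le_R (S : PySem.Set Int) (v : Int) (l : List Int) (hv : v ∉ S) :
    l.count v ≤ pvR S l := by
  rw [pvR_add S v l hv]; omega

-- one line's contribution to the value→line-ids map
theorem pvInnerBuild (l : List Int) (lid : Int) (d : PySem.Dict Int (List Int)) (v : Int) :
    (l.foldl (fun d x => d.modify x [] (· ++ [lid])) d).getD v []
      = d.getD v [] ++ List.replicate (l.count v) lid := by
  have h1 : l.foldl (fun d x => d.modify x [] (· ++ [lid])) d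
      = (l.map (fun x => (x, lid))).foldl (fun d p => d.modify p.1 [] (· ++ [p.2])) d := by
    rw [List.foldl_map]
  rw [h1, PySem.Dict.getD_foldl_modify_append]
  congr 1
  rw [List.filter_map, List.map_map]
  simp [Function.comp_def, List.map_const', List.count, List.countP_eq_length_filter]

theorem pvBuildMap_getD (ls : List (List Int)) (s : Int) (d : PySem.Dict Int (List Int)) (v : Int) :
    ((PySem.List.enumerate ls s).foldl
        (fun d p => p.2.foldl (fun d x => d.modify x [] (· ++ [p.1])) d) d).getD v []
      = d.getD v [] ++ (PySem.List.enumerate ls s).flatMap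
          (fun p => List.replicate (p.2.count v) p.1) := by
  induction ls generalizing s d with
  | nil => simp [PySem.List.enumerate]
  | cons l ls ih =>
    rw [PySem.List.enumerate_cons]
    simp only [List.foldl_cons, List.flatMap_cons]
    rw [ih, pvInnerBuild]
    simp [List.append_assoc]

theorem pvGetD_mid (pre : List Int) (x : Int) (rest : List Int) (d : Int) :
    (pre ++ x :: rest).getD pre.length d = x := by
  induction pre with
  | nil => rfl
  | cons p ps _ => simp

theorem pvSet_mid (pre : List Int) (x : Int) (rest : List Int) (y : Int) :
    (pre ++ x :: rest).set pre.length y = pre ++ y :: rest := by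
  induction pre with
  | nil => rfl
  | cons p ps ih => simp [ih]

theorem pvDec_replicate (c : Nat) (lid : Nat) (rem : List Int) (bc : Int)
    (hlt : lid < rem.length) (hle : (c : Int) ≤ rem.getD lid 0) :
    (List.replicate c ((lid : Nat) : Int)).foldl pvDec (rem, bc)
      = (rem.set lid (rem.getD lid 0 - c),
         bc + if 0 < c ∧ rem.getD lid 0 = (c : Int) then 1 else 0) := by
  induction c generalizing rem bc with
  | zero =>
    simp only [List.replicate_zero, List.foldl_nil, Nat.cast_zero, Int.sub_zero]
    rw [List.getD_eq_getElem rem 0 hlt, List.set_getElem_self]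
    simp
  | succ c ih =>
    rw [List.replicate_succ, List.foldl_cons]
    have hgd : PySem.List.pyGetD rem ((lid : Nat) : Int) 0 = rem.getD lid 0 :=
      PySem.List.pyGetD_natCast rem lid 0
    have hsd : PySem.List.pySetD rem ((lid : Nat) : Int) (rem.getD lid 0 - 1)
        = rem.set lid (rem.getD lid 0 - 1) := PySem.List.pySetD_natCast rem lid _
    simp only [pvDec, hgd, hsd]
    have hlt' : lid < (rem.set lid (rem.getD lid 0 - 1)).length := by
      simpa [List.length_set] using hlt
    have hgd' : (rem.set lid (rem.getD lid 0 - 1)).getD lid 0 = rem.getD lid 0 - 1 := by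
      rw [List.getD_eq_getElem _ 0 hlt']
      simp
    have hle' : (c : Int) ≤ (rem.set lid (rem.getD lid 0 - 1)).getD lid 0 := by
      rw [hgd']; push_cast at hle ⊢; omega
    rw [ih _ _ hlt' hle']
    rw [hgd', List.set_set]
    rw [Prod.mk.injEq]
    constructor
    · congr 1; push_cast; ring
    · push_cast at hle ⊢
      split_ifs <;> omega

theorem pvDec_lines (v : Int) (S : PySem.Set Int) (hv : v ∉ S) :
    ∀ (ls : List (List Int)) (pre : List Int) (bc : Int),
    ((PySem.List.enumerate ls (pre.length : Int)).flatMap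
        (fun p => List.replicate (p.2.count v) p.1)).foldl pvDec
        (pre ++ ls.map (fun l => (pvR S l : Int)), bc)
      = (pre ++ ls.map (fun l => (pvR (S.add v) l : Int)),
         bc + ((ls.countP (fun l => decide (pvR (S.add v) l = 0)) : Int)
               - (ls.countP (fun l => decide (pvR S l = 0)) : Int))) := by
  intro ls
  induction ls with
  | nil => intro pre bc; simp [PySem.List.enumerate]
  | cons l ls ih =>
    intro pre bc
    rw [PySem.List.enumerate_cons]
    simp only [List.flatMap_cons, List.foldl_append, List.map_cons]
    have hlt : pre.length < (pre ++ (pvR S l : Int) :: ls.map (fun l => (pvR S l : Int))).length := by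
      simp
    have hgd : (pre ++ (pvR S l : Int) :: ls.map (fun l => (pvR S l : Int))).getD pre.length 0
        = (pvR S l : Int) := pvGetD_mid _ _ _ _
    have hle : ((l.count v : Nat) : Int)
        ≤ (pre ++ (pvR S l : Int) :: ls.map (fun l => (pvR S l : Int))).getD pre.length 0 := by
      rw [hgd]; exact_mod_cast pvCount_le_R S v l hv
    rw [pvDec_replicate (l.count v) pre.length _ bc hlt hle]
    rw [hgd, pvSet_mid]
    have hR' : (pvR S l : Int) - (l.count v : Nat) = (pvR (S.add v) l : Int) := by
      have := pvR_add S v l hv; omega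
    rw [hR']
    have hpre' : (pre ++ [(pvR (S.add v) l : Int)]).length = pre.length + 1 := by simp
    have := ih (pre ++ [(pvR (S.add v) l : Int)]) (bc + if 0 < l.count v ∧ (pvR S l : Int) = (l.count v : Nat) then 1 else 0)
    rw [hpre'] at this
    push_cast at this
    have hassoc : ∀ (z : Int) (r : List Int), (pre ++ [z]) ++ r = pre ++ z :: r := by
      intro z r; simp
    rw [hassoc, hassoc] at this
    rw [this]
    rw [Prod.mk.injEq]
    constructor
    · rfl
    · simp only [List.countP_cons, decide_eq_true_eq]
      have hRa := pvR_add S v l hv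
      push_cast
      split_ifs <;> push_cast at hRa ⊢ <;> omega

theorem pvGo_eq (lines : List (List Int)) :
    ∀ (calls : List Int) (S : PySem.Set Int) (count : Int),
    pvAGo lines calls S count
      = pvBGo (pvBuildMap lines) calls S (lines.map (fun l => (pvR S l : Int)))
          ((lines.countP (fun l => decide (pvR S l = 0)) : Int)) count := by
  intro calls
  induction calls with
  | nil => intro S count; rfl
  | cons v rest ih =>
    intro S count
    by_cases hS : v ∈ S
    · have hadd : S.add v = S := PySem.Set.add_of_mem hS
      have hcont : S.contains v = true := (PySem.Set.contains_iff _ _).2 hS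
      simp only [pvAGo, pvBGo, hadd, hcont, if_true]
      rw [pvCountComplete_eq]
      by_cases h3 : ((lines.countP (fun l => decide (pvR S l = 0)) : Nat) : Int) ≥ 3
      · simp [h3]
      · simp [h3, ih]
    · have hcont : S.contains v = false := by
        rw [Bool.eq_false_iff]; intro hc; exact hS ((PySem.Set.contains_iff _ _).1 hc)
      simp only [pvAGo, pvBGo, hcont, Bool.false_eq_true, if_false]
      have hids : (pvBuildMap lines).getD v []
          = (PySem.List.enumerate lines 0).flatMap (fun p => List.replicate (p.2.count v) p.1) := by
        unfold pvBuildMap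
        rw [pvBuildMap_getD]
        simp
      have hdec := pvDec_lines v S hS lines [] ((lines.countP (fun l => decide (pvR S l = 0)) : Nat) : Int)
      simp only [List.nil_append, List.length_nil, Nat.cast_zero] at hdec
      rw [hids, hdec]
      have hbc : ((lines.countP (fun l => decide (pvR S l = 0)) : Nat) : Int)
          + (((lines.countP (fun l => decide (pvR (S.add v) l = 0)) : Nat) : Int)
             - ((lines.countP (fun l => decide (pvR S l = 0)) : Nat) : Int))
          = ((lines.countP (fun l => decide (pvR (S.add v) l = 0)) : Nat) : Int) := by ring
      rw [hbc, pvCountComplete_eq]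
      by_cases h3 : ((lines.countP (fun l => decide (pvR (S.add v) l = 0)) : Nat) : Int) ≥ 3
      · simp [h3]
      · simp [h3, ih]

theorem pvCol_eq (bingo : List (List Int)) (i : Nat) :
    (List.range bingo.length).map (fun j => (bingo.getD j []).getD i 0)
      = bingo.map (fun row => row.getD i 0) := by
  apply List.ext_getElem
  · simp
  · intro n h1 h2
    simp only [List.getElem_map, List.getElem_range]
    rw [List.getD_eq_getElem bingo [] (by simpa using h2)]

theorem pvLinesA_foldl (bingo : List (List Int)) :
    ∀ (m : Nat) (a : List (List Int)) (b c : List Int),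
    (List.range m).foldl
      (fun (st : List (List Int) × List Int × List Int) i =>
        (st.1 ++ [bingo.getD i []] ++ [(List.range bingo.length).map (fun j => (bingo.getD j []).getD i 0)],
         st.2.1 ++ [(bingo.getD i []).getD i 0],
         st.2.2 ++ [(bingo.getD i []).getD (bingo.length - 1 - i) 0])) (a, b, c)
      = ((List.range m).foldl
           (fun acc i => acc ++ [bingo.getD i []] ++ [bingo.map (fun row => row.getD i 0)]) a,
         b ++ (List.range m).map (fun i => (bingo.getD i []).getD i 0),
         c ++ (List.range m).map (fun i => (bingo.getD i []).getD (bingo.length - 1 - i) 0)) := by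
  intro m
  induction m with
  | zero => intro a b c; simp
  | succ m ih =>
    intro a b c
    rw [List.range_succ]
    simp only [List.foldl_append, List.map_append, List.foldl_cons, List.foldl_nil,
      List.map_cons, List.map_nil]
    rw [ih, pvCol_eq bingo m]
    simp [List.append_assoc]

theorem pvLines_eq (bingo : List (List Int)) : pvLinesB bingo = pvLinesA bingo := by
  simp only [pvLinesA, pvLinesB]
  rw [pvLinesA_foldl bingo bingo.length [] [] []]
  simp

theorem pvBfold_eq_flatMap (bingo : List (List Int)) :
    ∀ (m : Nat) (a : List (List Int)),
    (List.range m).foldl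
        (fun acc i => acc ++ [bingo.getD i []] ++ [bingo.map (fun row => row.getD i 0)]) a
      = a ++ (List.range m).flatMap
          (fun i => [bingo.getD i [], bingo.map (fun row => row.getD i 0)]) := by
  intro m
  induction m with
  | zero => intro a; simp
  | succ m ih =>
    intro a
    rw [List.range_succ]
    simp only [List.foldl_append, List.foldl_cons, List.foldl_nil]
    rw [ih]
    simp [List.flatMap_append, List.append_assoc]

theorem pvLinesA_ne_nil (bingo : List (List Int))
    (hpre : ∀ row ∈ bingo, bingo.length ≤ row.length) (hb : bingo ≠ []) :
    ∀ l ∈ pvLinesA bingo, l ≠ [] := by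
  have hn : 0 < bingo.length := List.length_pos_iff.2 hb
  rw [← pvLines_eq]
  intro l hl
  simp only [pvLinesB] at hl
  rw [pvBfold_eq_flatMap] at hl
  simp only [List.nil_append, List.mem_append, List.mem_flatMap, List.mem_range, List.mem_cons,
    List.not_mem_nil, or_false] at hl
  rcases hl with (hl | hl) | hl
  · obtain ⟨i, hi, hcase⟩ := hl
    rcases hcase with h | h
    · subst h
      rw [List.getD_eq_getElem bingo [] hi]
      have := hpre (bingo[i]) (List.getElem_mem hi)
      intro hnil
      rw [hnil] at this
      simp only [List.length_nil, Nat.le_zero] at this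
      omega
    · subst h
      exact fun hnil => hb (List.map_eq_nil_iff.1 hnil)
  · subst hl
    intro hnil
    have h0 := List.map_eq_nil_iff.1 hnil
    rw [List.range_eq_nil] at h0
    omega
  · subst hl
    intro hnil
    have h0 := List.map_eq_nil_iff.1 hnil
    rw [List.range_eq_nil] at h0
    omega

theorem pvAGo_empty : ∀ (calls : List Int) (S : PySem.Set Int) (count : Int),
    pvAGo [[], []] calls S count = count + calls.length := by
  intro calls
  induction calls with
  | nil => intro S count; simp [pvAGo]
  | cons v rest ih =>
    intro S count
    have h2 : pvCountComplete (S.add v) [[], []] = 2 := rfl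
    simp only [pvAGo, h2]
    norm_num
    rw [ih]
    ring

theorem pvBGo_empty : ∀ (calls : List Int) (S : PySem.Set Int) (rem : List Int) (count : Int),
    pvBGo PySem.Dict.empty calls S rem 0 count = count + calls.length := by
  intro calls
  induction calls with
  | nil => intro S rem count; simp [pvBGo]
  | cons v rest ih =>
    intro S rem count
    by_cases hS : S.contains v = true
    · simp only [pvBGo, hS, if_true]
      norm_num
      rw [ih]
      ring
    · rw [Bool.not_eq_true] at hS
      simp only [pvBGo, hS, Bool.false_eq_true, if_false]
      have hg : (PySem.Dict.empty : PySem.Dict Int (List Int)).getD v [] = [] := rfl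
      rw [hg]
      simp only [List.foldl_nil]
      norm_num
      rw [ih]
      ring

theorem pvR_empty (l : List Int) : pvR ([] : PySem.Set Int) l = l.length := by
  simp [pvR, PySem.Set.contains]

-- ===== VERDICT (by name: the statement is the Claim_ definition above) =====
theorem solution_spec : Claim_equal_solution := by
  intro bingo moderator _hdom hpre
  simp only [Spec_solution, solution, solution_alt]
  by_cases hb : bingo = []
  · subst hb
    have hA : pvLinesA [] = [[], []] := rfl
    have hB : pvLinesB [] = [[], []] := rfl
    rw [hA, hB]
    have hM : pvBuildMap [[], []] = PySem.Dict.empty := rfl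
    rw [hM, pvAGo_empty, pvBGo_empty]
    rfl
  · have hne := pvLinesA_ne_nil bingo hpre.1 hb
    rw [pvLines_eq]
    have hrem : (pvLinesA bingo).map (fun l => (l.length : Int))
        = (pvLinesA bingo).map (fun l => (pvR ([] : PySem.Set Int) l : Int)) := by
      apply List.map_congr_left
      intro l _
      rw [pvR_empty]
    have hbc : (((pvLinesA bingo).countP (fun l => decide (pvR ([] : PySem.Set Int) l = 0)) : Nat) : Int) = 0 := by
      have : (pvLinesA bingo).countP (fun l => decide (pvR ([] : PySem.Set Int) l = 0)) = 0 := by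
        rw [List.countP_eq_zero]
        intro l hl
        rw [pvR_empty]
        simpa using hne l hl
      rw [this]
      rfl
    have hgo := pvGo_eq (pvLinesA bingo) (pvCallsB moderator) ([] : PySem.Set Int) 0
    rw [hbc, ← hrem] at hgo
    exact hgo
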